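-- pv_equiv track=rewrite | github.com/AlistairRobinson/AdventOfCode19 | src/Day20.py | p2_get_portals
-- ===== SOURCE A (Python) =====
-- from typing import Tuple, List, Dict, Set
--
-- def p1_adj(p:Tuple[int, int]) -> List[Tuple[int, int]]:
--     return [(p[0] + 1, p[1]), (p[0] - 1, p[1]), (p[0], p[1] + 1), (p[0], p[1] - 1)]
--
-- def p2_get_portals(grid:List[str]) -> Dict[str, Tuple[int, int]]:
--     l = {}
--     for i in range(len(grid)):
--         for j in range(len(grid[0])):
--             if (grid[i][j] == '.'):
--                 for (x, y) in p1_adj((i, j)):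
--                     if (x < 0 or x >= len(grid) or y < 0 or y >= len(grid[0])):
--                         continue
--                     if ('A' <= grid[x][y] <= 'Z'):
--                         for (a, b) in p1_adj((x, y)):
--                             if (a < 0 or a >= len(grid) or b < 0 or b >= len(grid[0])):
--                                 continue
--                             if ('A' <= grid[a][b] <= 'Z'):
--                                 if (a < len(grid) / 5 or a >= 4 * len(grid) / 5 or b < len(grid[0]) / 5 or b >= 4 * len(grid[0]) / 5):
--                                     n = "$".join(sorted([grid[x][y], grid[a][b]]))
--                                 else:
--                                     n = "^".join(sorted([grid[x][y], grid[a][b]]))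
--                                 l[n] = ((i, j))
--     return l
-- ===== SOURCE B (Python) =====
-- def p2_get_portals(grid):
--     rows = len(grid)
--     cols = len(grid[0]) if grid else 0
--     dirs = [(1, 0), (-1, 0), (0, 1), (0, -1)]
--
--     def outer(r, c):
--         return r < rows / 5 or r >= 4 * rows / 5 or c < cols / 5 or c >= 4 * cols / 5
--
--     # index each letter cell by the portal names it carries (one per adjacent letter)
--     labels = {}
--     for x in range(rows):
--         for y in range(cols):
--             if not ('A' <= grid[x][y] <= 'Z'):
--                 continue
--             for dx, dy in dirs:
--                 a, b = x + dx, y + dy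
--                 if 0 <= a < rows and 0 <= b < cols and 'A' <= grid[a][b] <= 'Z':
--                     sep = "$" if outer(a, b) else "^"
--                     labels.setdefault((x, y), []).append(sep.join(sorted([grid[x][y], grid[a][b]])))
--
--     portals = {}
--     for i in range(rows):
--         for j in range(cols):
--             if grid[i][j] != '.':
--                 continue
--             for dx, dy in dirs:
--                 for name in labels.get((i + dx, j + dy), []):
--                     portals[name] = (i, j)
--     return portals
-- ===== Notes on version B (the rewrite author's own statement) =====
-- stated objective: alternative
-- what changed: B first builds a dictionary index mapping each letter cell to its portal labels (one pass over adjacent letter pairs), then a single scan over dot cells assigns labels by dictionary lookup, replacing A's per-dot doubly-nested neighbourhood search with bounds checks; Pre_ excludes ragged grids (a row shorter than row 0), on which A raises IndexError.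
import Mathlib
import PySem

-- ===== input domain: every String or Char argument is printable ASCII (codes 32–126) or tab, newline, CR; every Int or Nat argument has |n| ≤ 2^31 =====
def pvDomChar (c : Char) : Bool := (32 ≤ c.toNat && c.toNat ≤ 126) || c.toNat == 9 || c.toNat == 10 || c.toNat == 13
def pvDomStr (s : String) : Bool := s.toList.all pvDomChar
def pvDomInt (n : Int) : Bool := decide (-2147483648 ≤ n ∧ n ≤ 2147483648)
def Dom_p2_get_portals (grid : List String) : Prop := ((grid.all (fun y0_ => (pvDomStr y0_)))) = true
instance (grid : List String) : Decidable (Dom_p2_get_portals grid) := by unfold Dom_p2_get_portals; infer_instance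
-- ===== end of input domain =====

-- B builds a dictionary index from letter cells to their portal labels in one pass over
-- adjacent letter pairs, then assigns labels to dot cells by dictionary lookup
-- (objective: alternative decomposition, removing A's per-dot nested neighbourhood search).

-- ===== PORT A =====
-- p1_adj
def pvAdj (p : Int × Int) : List (Int × Int) :=
  [(p.1 + 1, p.2), (p.1 - 1, p.2), (p.1, p.2 + 1), (p.1, p.2 - 1)]

-- grid[i][j]; under Pre_ every access A makes is in range, so the defaults are never the result
def pvAt (grid : List String) (i j : Int) : Char :=
  PySem.List.pyGetD (PySem.List.pyGetD grid i "").toList j ' '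

-- Python compares ints against the floats len/5 and 4*len/5; for |len| ≤ 2^31 those float
-- comparisons agree exactly with the integer forms 5*a < len and 5*a ≥ 4*len used here.
def p2_get_portals (grid : List String) : List (String × Int × Int) :=
  let R : Int := grid.length
  let C : Int := PySem.Str.len (PySem.List.pyGetD grid 0 "")
  let d : PySem.Dict String (Int × Int) :=
    (PySem.List.pyRange 0 R 1).foldl (fun l i =>
    (PySem.List.pyRange 0 C 1).foldl (fun l j =>
      if pvAt grid i j = '.' then
        (pvAdj (i, j)).foldl (fun l q =>
          if q.1 < 0 ∨ q.1 ≥ R ∨ q.2 < 0 ∨ q.2 ≥ C then l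
          else if 'A' ≤ pvAt grid q.1 q.2 ∧ pvAt grid q.1 q.2 ≤ 'Z' then
            (pvAdj q).foldl (fun l r =>
              if r.1 < 0 ∨ r.1 ≥ R ∨ r.2 < 0 ∨ r.2 ≥ C then l
              else if 'A' ≤ pvAt grid r.1 r.2 ∧ pvAt grid r.1 r.2 ≤ 'Z' then
                l.insert
                  (if 5 * r.1 < R ∨ 5 * r.1 ≥ 4 * R ∨ 5 * r.2 < C ∨ 5 * r.2 ≥ 4 * C then
                    PySem.Str.join "$" (PySem.List.sorted
                      [String.singleton (pvAt grid q.1 q.2), String.singleton (pvAt grid r.1 r.2)]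
                      (fun s => s) false)
                  else
                    PySem.Str.join "^" (PySem.List.sorted
                      [String.singleton (pvAt grid q.1 q.2), String.singleton (pvAt grid r.1 r.2)]
                      (fun s => s) false))
                  (i, j)
              else l) l
          else l) l
      else l) l) (PySem.Dict.empty : PySem.Dict String (Int × Int))
  d.items

-- ===== PORT B =====
def pvDirs : List (Int × Int) := [(1, 0), (-1, 0), (0, 1), (0, -1)]

-- same float-threshold remark as in port A; labels.setdefault(p, []).append(n) is
-- d[p] = d.get(p, []) + [n], i.e. Dict.modify p [] (· ++ [n])
def p2_get_portals_alt (grid : List String) : List (String × Int × Int) :=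
  let rows : Int := grid.length
  let cols : Int := if grid = [] then 0 else PySem.Str.len (PySem.List.pyGetD grid 0 "")
  let labels : PySem.Dict (Int × Int) (List String) :=
    (PySem.List.pyRange 0 rows 1).foldl (fun lab x =>
      (PySem.List.pyRange 0 cols 1).foldl (fun lab y =>
        if ¬ ('A' ≤ pvAt grid x y ∧ pvAt grid x y ≤ 'Z') then lab else
        pvDirs.foldl (fun lab dxy =>
          let a := x + dxy.1
          let b := y + dxy.2
          if 0 ≤ a ∧ a < rows ∧ 0 ≤ b ∧ b < cols ∧
             'A' ≤ pvAt grid a b ∧ pvAt grid a b ≤ 'Z' then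
            lab.modify (x, y) []
              (· ++ [PySem.Str.join
                (if 5 * a < rows ∨ 5 * a ≥ 4 * rows ∨ 5 * b < cols ∨ 5 * b ≥ 4 * cols
                 then "$" else "^")
                (PySem.List.sorted
                  [String.singleton (pvAt grid x y), String.singleton (pvAt grid a b)]
                  (fun s => s) false)])
          else lab) lab) lab) (PySem.Dict.empty : PySem.Dict (Int × Int) (List String))
  let portals : PySem.Dict String (Int × Int) :=
    (PySem.List.pyRange 0 rows 1).foldl (fun d i =>
      (PySem.List.pyRange 0 cols 1).foldl (fun d j =>
        if pvAt grid i j ≠ '.' then d else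
        pvDirs.foldl (fun d dxy =>
          (labels.getD (i + dxy.1, j + dxy.2) []).foldl (fun d n => d.insert n (i, j)) d) d) d)
      (PySem.Dict.empty : PySem.Dict String (Int × Int))
  portals.items

-- ===== PRECONDITION & SPEC =====
-- Pre_ excludes exactly the grids on which A raises IndexError: some row shorter than row 0
-- (A indexes every row, and in-window cells of every row, at all columns of row 0).
def Pre_p2_get_portals (grid : List String) : Prop :=
  ∀ s ∈ grid, (PySem.List.pyGetD grid 0 "").length ≤ s.length
instance (grid : List String) : Decidable (Pre_p2_get_portals grid) := by
  unfold Pre_p2_get_portals; infer_instance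

def pvWitness_p2_get_portals : List String := ["AA. ", "    ", " BB."]

def Spec_p2_get_portals (grid : List String) (out : List (String × Int × Int)) : Prop := out = p2_get_portals_alt grid
instance (grid : List String) (out : List (String × Int × Int)) : Decidable (Spec_p2_get_portals grid out) := by unfold Spec_p2_get_portals; infer_instance

-- ===== CLAIM (what is proved, stated in full; the proofs are below) =====
def Claim_equal_p2_get_portals : Prop := ∀ (grid : List String), Dom_p2_get_portals grid → Pre_p2_get_portals grid → Spec_p2_get_portals grid (p2_get_portals grid)

-- ===== LEMMAS AND PROOFS =====

def pvR (g : List String) : Int := g.length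
def pvC (g : List String) : Int := PySem.Str.len (PySem.List.pyGetD g 0 "")

abbrev pvLtr (g : List String) (a b : Int) : Prop :=
  0 ≤ a ∧ a < pvR g ∧ 0 ≤ b ∧ b < pvC g ∧ 'A' ≤ pvAt g a b ∧ pvAt g a b ≤ 'Z'

def pvName (g : List String) (x y a b : Int) : String :=
  if 5 * a < pvR g ∨ 5 * a ≥ 4 * pvR g ∨ 5 * b < pvC g ∨ 5 * b ≥ 4 * pvC g then
    PySem.Str.join "$" (PySem.List.sorted
      [String.singleton (pvAt g x y), String.singleton (pvAt g a b)] (fun s => s) false)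
  else
    PySem.Str.join "^" (PySem.List.sorted
      [String.singleton (pvAt g x y), String.singleton (pvAt g a b)] (fun s => s) false)

-- the label contributed by far letter (a,b) to near letter (x,y), as a 0/1-element list
def pvInd (g : List String) (x y a b : Int) : List String :=
  if pvLtr g a b then [pvName g x y a b] else []

-- all labels carried by letter cell (x,y), in scan order
def pvNbr (g : List String) (x y : Int) : List String :=
  pvInd g x y (x + 1) y ++ pvInd g x y (x - 1) y ++ pvInd g x y x (y + 1) ++ pvInd g x y x (y - 1)

def pvNames (g : List String) (a b : Int) : List String :=
  if pvLtr g a b then pvNbr g a b else []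

def pvIndP (g : List String) (x y a b : Int) : List ((Int × Int) × String) :=
  if pvLtr g a b then [((x, y), pvName g x y a b)] else []

def pvCellL (g : List String) (x y : Int) : List ((Int × Int) × String) :=
  if 'A' ≤ pvAt g x y ∧ pvAt g x y ≤ 'Z' then
    pvIndP g x y (x + 1) y ++ pvIndP g x y (x - 1) y ++ pvIndP g x y x (y + 1) ++ pvIndP g x y x (y - 1)
  else []

def pvPairsL (g : List String) : List ((Int × Int) × String) :=
  (PySem.List.pyRange 0 (pvR g) 1).flatMap (fun x =>
    (PySem.List.pyRange 0 (pvC g) 1).flatMap (fun y => pvCellL g x y))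

def pvModStep (d : PySem.Dict (Int × Int) (List String)) (p : (Int × Int) × String) :
    PySem.Dict (Int × Int) (List String) := d.modify p.1 [] (· ++ [p.2])

def pvLabD (g : List String) : PySem.Dict (Int × Int) (List String) :=
  (pvPairsL g).foldl pvModStep PySem.Dict.empty

lemma pvC_eqB (g : List String) :
    (if g = [] then (0 : Int) else pvC g) = pvC g := by
  cases g with
  | nil => simp [pvC]
  | cons a t => rfl

lemma pv_len_eq (g : List String) : ((g.length : Nat) : Int) = pvR g := rfl

lemma pv_strlen_eq (g : List String) :
    PySem.Str.len (PySem.List.pyGetD g 0 "") = pvC g := rfl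

lemma pv_foldl_foldl_flatMap {α β σ : Type} (f : α → List β) (step : σ → β → σ)
    (l : List α) (s : σ) :
    l.foldl (fun s a => (f a).foldl step s) s = (l.flatMap f).foldl step s := by
  induction l generalizing s with
  | nil => simp
  | cons a l ih => simp [List.flatMap_cons, List.foldl_append, ih]

lemma pv_flatMap_single {γ : Type} (f : Int → List γ) (lo hi x0 : Int)
    (h1 : lo ≤ x0) (h2 : x0 < hi) (h : ∀ x, x ≠ x0 → f x = []) :
    (PySem.List.pyRange lo hi 1).flatMap f = f x0 := by
  rw [PySem.List.pyRange_one_append lo x0 hi h1 (le_of_lt h2),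
      PySem.List.pyRange_one_cons h2]
  rw [List.flatMap_append, List.flatMap_cons]
  have e1 : (PySem.List.pyRange lo x0 1).flatMap f = [] :=
    List.flatMap_eq_nil_iff.mpr (fun x hx =>
      h x (by have := PySem.List.mem_pyRange_one.mp hx; omega))
  have e2 : (PySem.List.pyRange (x0 + 1) hi 1).flatMap f = [] :=
    List.flatMap_eq_nil_iff.mpr (fun x hx =>
      h x (by have := PySem.List.mem_pyRange_one.mp hx; omega))
  simp [e1, e2]

lemma pv_flatMap_nil {γ : Type} (f : Int → List γ) (l : List Int)
    (h : ∀ x ∈ l, f x = []) : l.flatMap f = [] :=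
  List.flatMap_eq_nil_iff.mpr h

-- ===== first pass: the label dictionary =====

lemma pv_dirB_piece (g : List String) (x y a b : Int)
    (lab : PySem.Dict (Int × Int) (List String)) :
    (if 0 ≤ a ∧ a < pvR g ∧ 0 ≤ b ∧ b < pvC g ∧
        'A' ≤ pvAt g a b ∧ pvAt g a b ≤ 'Z' then
      lab.modify (x, y) []
        (· ++ [PySem.Str.join
          (if 5 * a < pvR g ∨ 5 * a ≥ 4 * pvR g ∨ 5 * b < pvC g ∨ 5 * b ≥ 4 * pvC g
           then "$" else "^")
          (PySem.List.sorted
            [String.singleton (pvAt g x y), String.singleton (pvAt g a b)]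
            (fun s => s) false)])
     else lab) = (pvIndP g x y a b).foldl pvModStep lab := by
  unfold pvIndP
  by_cases hP : pvLtr g a b
  · rw [if_pos hP, if_pos hP]
    show _ = pvModStep lab ((x, y), pvName g x y a b)
    unfold pvModStep pvName
    split_ifs <;> rfl
  · rw [if_neg hP, if_neg hP]
    rfl

lemma pv_cell_fold (g : List String) (x y : Int)
    (lab : PySem.Dict (Int × Int) (List String)) :
    (if ¬ ('A' ≤ pvAt g x y ∧ pvAt g x y ≤ 'Z') then lab else
      pvDirs.foldl (fun lab dxy =>
        if 0 ≤ x + dxy.1 ∧ x + dxy.1 < pvR g ∧ 0 ≤ y + dxy.2 ∧ y + dxy.2 < pvC g ∧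
           'A' ≤ pvAt g (x + dxy.1) (y + dxy.2) ∧ pvAt g (x + dxy.1) (y + dxy.2) ≤ 'Z' then
          lab.modify (x, y) []
            (· ++ [PySem.Str.join
              (if 5 * (x + dxy.1) < pvR g ∨ 5 * (x + dxy.1) ≥ 4 * pvR g ∨
                  5 * (y + dxy.2) < pvC g ∨ 5 * (y + dxy.2) ≥ 4 * pvC g
               then "$" else "^")
              (PySem.List.sorted
                [String.singleton (pvAt g x y), String.singleton (pvAt g (x + dxy.1) (y + dxy.2))]
                (fun s => s) false)])
        else lab) lab) = (pvCellL g x y).foldl pvModStep lab := by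
  unfold pvCellL
  by_cases hL : 'A' ≤ pvAt g x y ∧ pvAt g x y ≤ 'Z'
  · rw [if_neg (not_not_intro hL), if_pos hL]
    simp only [pvDirs, List.foldl_cons, List.foldl_nil, add_zero]
    rw [pv_dirB_piece, pv_dirB_piece, pv_dirB_piece, pv_dirB_piece]
    simp only [List.foldl_append, sub_eq_add_neg]
  · rw [if_pos hL, if_neg hL]
    rfl

lemma pv_labels_eq (g : List String) :
    ((PySem.List.pyRange 0 (pvR g) 1).foldl (fun lab x =>
      (PySem.List.pyRange 0 (pvC g) 1).foldl (fun lab y =>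
        if ¬ ('A' ≤ pvAt g x y ∧ pvAt g x y ≤ 'Z') then lab else
        pvDirs.foldl (fun lab dxy =>
          if 0 ≤ x + dxy.1 ∧ x + dxy.1 < pvR g ∧ 0 ≤ y + dxy.2 ∧ y + dxy.2 < pvC g ∧
             'A' ≤ pvAt g (x + dxy.1) (y + dxy.2) ∧ pvAt g (x + dxy.1) (y + dxy.2) ≤ 'Z' then
            lab.modify (x, y) []
              (· ++ [PySem.Str.join
                (if 5 * (x + dxy.1) < pvR g ∨ 5 * (x + dxy.1) ≥ 4 * pvR g ∨
                    5 * (y + dxy.2) < pvC g ∨ 5 * (y + dxy.2) ≥ 4 * pvC g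
                 then "$" else "^")
                (PySem.List.sorted
                  [String.singleton (pvAt g x y), String.singleton (pvAt g (x + dxy.1) (y + dxy.2))]
                  (fun s => s) false)])
          else lab) lab) lab) (PySem.Dict.empty : PySem.Dict (Int × Int) (List String))) =
    pvLabD g := by
  unfold pvLabD pvPairsL
  rw [← pv_foldl_foldl_flatMap]
  apply PySem.List.foldl_congr_mem
  intro lab x _
  rw [← pv_foldl_foldl_flatMap]
  apply PySem.List.foldl_congr_mem
  intro lab' y _
  exact pv_cell_fold g x y lab'

lemma pv_filt_cell (g : List String) (x y x0 y0 : Int) :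
    (pvCellL g x y).filter (fun p => p.1 == (x0, y0)) =
      if x = x0 ∧ y = y0 then pvCellL g x y else [] := by
  by_cases hxy : x = x0 ∧ y = y0
  · obtain ⟨rfl, rfl⟩ := hxy
    rw [if_pos ⟨rfl, rfl⟩]
    unfold pvCellL pvIndP
    split_ifs <;> simp
  · rw [if_neg hxy]
    unfold pvCellL pvIndP
    split_ifs <;> simp_all [Prod.ext_iff]

lemma pv_indP_snd (g : List String) (x y a b : Int) :
    (pvIndP g x y a b).map (·.2) = pvInd g x y a b := by
  unfold pvIndP pvInd
  split_ifs <;> simp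

lemma pv_cell_map_snd (g : List String) (x y : Int)
    (hx : 0 ≤ x) (hxR : x < pvR g) (hy : 0 ≤ y) (hyC : y < pvC g) :
    (pvCellL g x y).map (·.2) = pvNames g x y := by
  unfold pvCellL pvNames pvNbr
  by_cases hL : 'A' ≤ pvAt g x y ∧ pvAt g x y ≤ 'Z'
  · rw [if_pos hL, if_pos ⟨hx, hxR, hy, hyC, hL.1, hL.2⟩]
    simp only [List.map_append, pv_indP_snd]
  · rw [if_neg hL, if_neg (fun h => hL ⟨h.2.2.2.2.1, h.2.2.2.2.2⟩)]
    simp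

lemma pv_names_out (g : List String) (x0 y0 : Int)
    (h : ¬ (0 ≤ x0 ∧ x0 < pvR g ∧ 0 ≤ y0 ∧ y0 < pvC g)) : pvNames g x0 y0 = [] := by
  unfold pvNames
  rw [if_neg (fun hc => h ⟨hc.1, hc.2.1, hc.2.2.1, hc.2.2.2.1⟩)]

lemma pv_getD_labD (g : List String) (x0 y0 : Int) :
    (pvLabD g).getD (x0, y0) [] = pvNames g x0 y0 := by
  unfold pvLabD pvModStep
  rw [PySem.Dict.getD_foldl_modify_append]
  rw [PySem.Dict.getD_empty, List.nil_append]
  unfold pvPairsL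
  rw [List.filter_flatMap]
  by_cases hin : 0 ≤ x0 ∧ x0 < pvR g ∧ 0 ≤ y0 ∧ y0 < pvC g
  · rw [pv_flatMap_single _ 0 (pvR g) x0 hin.1 hin.2.1 ?hx]
    case hx =>
      intro x hx
      rw [List.filter_flatMap]
      apply pv_flatMap_nil
      intro y _
      rw [pv_filt_cell, if_neg (by rintro ⟨rfl, -⟩; exact hx rfl)]
    rw [List.filter_flatMap, pv_flatMap_single _ 0 (pvC g) y0 hin.2.2.1 hin.2.2.2 ?hy]
    case hy =>
      intro y hy
      rw [pv_filt_cell, if_neg (by rintro ⟨-, rfl⟩; exact hy rfl)]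
    rw [pv_filt_cell, if_pos ⟨rfl, rfl⟩]
    exact pv_cell_map_snd g x0 y0 hin.1 hin.2.1 hin.2.2.1 hin.2.2.2
  · rw [pv_flatMap_nil, pv_names_out g x0 y0 hin]
    · rfl
    · intro x hx
      rw [List.filter_flatMap]
      apply pv_flatMap_nil
      intro y hy
      rw [pv_filt_cell]
      have hxm := PySem.List.mem_pyRange_one.mp hx
      have hym := PySem.List.mem_pyRange_one.mp hy
      rw [if_neg (by rintro ⟨rfl, rfl⟩; exact hin ⟨hxm.1, hxm.2, hym.1, hym.2⟩)]

-- ===== second pass: assignment to dots =====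

lemma pv_innerA_piece (g : List String) (i j x y u v : Int) (d : PySem.Dict String (Int × Int)) :
    (if u < 0 ∨ u ≥ pvR g ∨ v < 0 ∨ v ≥ pvC g then d
     else if 'A' ≤ pvAt g u v ∧ pvAt g u v ≤ 'Z' then
       d.insert (pvName g x y u v) (i, j)
     else d) =
    (pvInd g x y u v).foldl (fun d n => d.insert n (i, j)) d := by
  unfold pvInd
  by_cases hP : pvLtr g u v
  · have h1 : ¬ (u < 0 ∨ u ≥ pvR g ∨ v < 0 ∨ v ≥ pvC g) := by
      obtain ⟨c1, c2, c3, c4, -, -⟩ := hP; omega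
    rw [if_neg h1, if_pos ⟨hP.2.2.2.2.1, hP.2.2.2.2.2⟩, if_pos hP]
    rfl
  · rw [if_neg hP]
    by_cases h1 : u < 0 ∨ u ≥ pvR g ∨ v < 0 ∨ v ≥ pvC g
    · rw [if_pos h1]; rfl
    · rw [if_neg h1,
        if_neg (fun h2 => hP ⟨by omega, by omega, by omega, by omega, h2.1, h2.2⟩)]
      rfl

lemma pv_dirA (g : List String) (i j a b : Int) (d : PySem.Dict String (Int × Int)) :
    (if a < 0 ∨ a ≥ pvR g ∨ b < 0 ∨ b ≥ pvC g then d
     else if 'A' ≤ pvAt g a b ∧ pvAt g a b ≤ 'Z' then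
       (pvAdj (a, b)).foldl (fun d r =>
         if r.1 < 0 ∨ r.1 ≥ pvR g ∨ r.2 < 0 ∨ r.2 ≥ pvC g then d
         else if 'A' ≤ pvAt g r.1 r.2 ∧ pvAt g r.1 r.2 ≤ 'Z' then
           d.insert (pvName g a b r.1 r.2) (i, j)
         else d) d
     else d) = (pvNames g a b).foldl (fun d n => d.insert n (i, j)) d := by
  unfold pvNames
  by_cases h1 : a < 0 ∨ a ≥ pvR g ∨ b < 0 ∨ b ≥ pvC g
  · rw [if_pos h1, if_neg (fun hP : pvLtr g a b => by
      obtain ⟨c1, c2, c3, c4, -, -⟩ := hP; omega)]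
    rfl
  · rw [if_neg h1]
    by_cases h2 : 'A' ≤ pvAt g a b ∧ pvAt g a b ≤ 'Z'
    · rw [if_pos h2, if_pos ⟨by omega, by omega, by omega, by omega, h2.1, h2.2⟩]
      simp only [pvAdj, List.foldl_cons, List.foldl_nil]
      rw [pv_innerA_piece, pv_innerA_piece, pv_innerA_piece, pv_innerA_piece]
      unfold pvNbr
      simp only [List.foldl_append]
    · rw [if_neg h2, if_neg (fun hP : pvLtr g a b => h2 ⟨hP.2.2.2.2.1, hP.2.2.2.2.2⟩)]
      rfl

set_option maxHeartbeats 1000000 in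
lemma pv_dot_eq (g : List String) (i j : Int) (d : PySem.Dict String (Int × Int)) :
    (if pvAt g i j = '.' then
      (pvAdj (i, j)).foldl (fun d q =>
        if q.1 < 0 ∨ q.1 ≥ pvR g ∨ q.2 < 0 ∨ q.2 ≥ pvC g then d
        else if 'A' ≤ pvAt g q.1 q.2 ∧ pvAt g q.1 q.2 ≤ 'Z' then
          (pvAdj q).foldl (fun d r =>
            if r.1 < 0 ∨ r.1 ≥ pvR g ∨ r.2 < 0 ∨ r.2 ≥ pvC g then d
            else if 'A' ≤ pvAt g r.1 r.2 ∧ pvAt g r.1 r.2 ≤ 'Z' then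
              d.insert (pvName g q.1 q.2 r.1 r.2) (i, j)
            else d) d
        else d) d
     else d) =
    (if pvAt g i j ≠ '.' then d else
      pvDirs.foldl (fun d dxy =>
        ((pvLabD g).getD (i + dxy.1, j + dxy.2) []).foldl (fun d n => d.insert n (i, j)) d) d) := by
  by_cases hd : pvAt g i j = '.'
  · rw [if_pos hd, if_neg (not_not_intro hd)]
    rw [show pvAdj (i, j) = [(i + 1, j), (i - 1, j), (i, j + 1), (i, j - 1)] from rfl]
    rw [show pvDirs = [((1 : Int), (0 : Int)), (-1, 0), (0, 1), (0, -1)] from rfl]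
    simp only [List.foldl_cons, List.foldl_nil]
    simp only [add_zero, pv_getD_labD]
    rw [pv_dirA, pv_dirA, pv_dirA, pv_dirA]
    simp only [sub_eq_add_neg]
  · rw [if_neg hd, if_pos hd]

-- ===== VERDICT (by name: the statement is the Claim_ definition above) =====
set_option maxHeartbeats 1000000 in
theorem p2_get_portals_spec : Claim_equal_p2_get_portals := by
  intro g _ _
  unfold Spec_p2_get_portals
  unfold p2_get_portals p2_get_portals_alt
  simp only [pv_len_eq g, pv_strlen_eq g, pvC_eqB g]
  simp only [pv_labels_eq g]
  congr 1
  apply PySem.List.foldl_congr_mem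
  intro d i _
  apply PySem.List.foldl_congr_mem
  intro d' j _
  exact pv_dot_eq g i j d'
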